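-- pv_equiv track=rewrite | github.com/JonathanWamsley/typers_terminal | typers_terminal/application/text_displayer.py | split_words_on_space_and_newline
-- ===== SOURCE A (Python) =====
-- def split_words_on_space_and_newline(words):
--     word_list = []
--     word = ''
--     for char in words:
--         if char == ' ':
--             if word:
--                 word_list.append(word)
--                 word = ''
--         elif char == '\n':
--             if word:
--                 word_list.append(word)
--             word_list.append('\n')
--             word = ''
--         else:
--             word += char
--     word_list.append(word)
--     return word_list
-- ===== SOURCE B (Python) =====
-- def split_words_on_space_and_newline(words):
--     lines = words.split('\n')
--     word_list = []
--     for line in lines[:-1]: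
--         word_list.extend(w for w in line.split(' ') if w)
--         word_list.append('\n')
--     parts = lines[-1].split(' ')
--     word_list.extend(w for w in parts[:-1] if w)
--     word_list.append(parts[-1])
--     return word_list
-- ===== Notes on version B (the rewrite author's own statement) =====
-- stated objective: simpler
-- what changed: Replaces A's char-by-char state machine (pending-word accumulator with per-character branching) by two-level splitting: split on the newline separator and interleave newline tokens, split each line on the space separator keeping non-empty words, with the last line's trailing field kept verbatim (which reproduces A's final append, including the empty token after a trailing separator).
import Mathlib
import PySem

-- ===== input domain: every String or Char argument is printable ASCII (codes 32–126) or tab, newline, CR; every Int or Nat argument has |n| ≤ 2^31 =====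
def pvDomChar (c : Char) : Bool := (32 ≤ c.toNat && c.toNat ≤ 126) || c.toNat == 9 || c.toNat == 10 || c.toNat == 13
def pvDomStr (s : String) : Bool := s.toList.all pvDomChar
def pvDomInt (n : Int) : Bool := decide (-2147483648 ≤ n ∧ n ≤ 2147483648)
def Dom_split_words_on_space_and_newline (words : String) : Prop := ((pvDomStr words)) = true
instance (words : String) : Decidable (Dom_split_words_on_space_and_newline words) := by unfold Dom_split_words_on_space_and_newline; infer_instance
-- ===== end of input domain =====

-- B replaces A's char-by-char state machine by split('\n')/split(' ') tokenization: words of each line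
-- interleaved with '\n' tokens, the last line's trailing field kept verbatim (simpler; measured faster
-- in a timing run via C-level str.split instead of a per-character Python loop).

-- ===== PORT A =====
-- the pending word is carried as a List Char; word += char is w ++ [c]
def split_words_on_space_and_newline (words : String) : List String :=
  let st := words.toList.foldl
    (fun (st : List String × List Char) char =>
      if char = ' ' then
        if st.2 ≠ [] then (st.1 ++ [String.ofList st.2], ([] : List Char)) else st
      else if char = '\n' then
        ((if st.2 ≠ [] then st.1 ++ [String.ofList st.2] else st.1) ++ ["\n"], ([] : List Char))
      else (st.1, st.2 ++ [char]))
    ([], ([] : List Char))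
  st.1 ++ [String.ofList st.2]

-- ===== PORT B =====
-- str.split(sep) is PySem.Str.split? (some, since the separators are nonempty: .getD [] never fires);
-- lines[:-1] is dropLast and lines[-1] / parts[-1] is getLastD: exact here because str.split(sep)
-- never returns an empty list (so no IndexError, and [:-1] drops exactly the last element)
def split_words_on_space_and_newline_alt (words : String) : List String :=
  let lines := (PySem.Str.split? words "\n").getD []
  let word_list := lines.dropLast.foldl
    (fun word_list line =>
      (((PySem.Str.split? line " ").getD []).foldl
        (fun acc w => if w ≠ "" then acc ++ [w] else acc) word_list) ++ ["\n"])
    []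
  let parts := (PySem.Str.split? (lines.getLastD "") " ").getD []
  (parts.dropLast.foldl (fun acc w => if w ≠ "" then acc ++ [w] else acc) word_list)
    ++ [parts.getLastD ""]

-- ===== PRECONDITION & SPEC =====
def Spec_split_words_on_space_and_newline (words : String) (out : List String) : Prop :=
  out = split_words_on_space_and_newline_alt words
instance (words : String) (out : List String) : Decidable (Spec_split_words_on_space_and_newline words out) := by
  unfold Spec_split_words_on_space_and_newline; infer_instance

-- ===== CLAIM (what is proved, stated in full; the proofs are below) =====
def Claim_equal_split_words_on_space_and_newline : Prop := ∀ (words : String), Dom_split_words_on_space_and_newline words → Spec_split_words_on_space_and_newline words (split_words_on_space_and_newline words)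

-- ===== LEMMAS AND PROOFS =====

-- A's state machine as a front recursion (w = pending word)
def pvTok : List Char → List Char → List String
  | w, [] => [String.ofList w]
  | w, c :: cs =>
    if c = ' ' then (if w ≠ [] then [String.ofList w] else []) ++ pvTok [] cs
    else if c = '\n' then (if w ≠ [] then [String.ofList w] else []) ++ "\n" :: pvTok [] cs
    else pvTok (w ++ [c]) cs

-- Python's str.split(c) (single-char separator) as a front recursion
def pvSplit (c : Char) : List Char → List (List Char)
  | [] => [[]]
  | d :: cs => if d = c then [] :: pvSplit c cs else (pvSplit c cs).modifyHead (d :: ·)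

def pvWtoks (l : List Char) : List String :=
  ((pvSplit ' ' l).filter (· ≠ [])).map String.ofList

-- tokens of the LAST line: every nonempty field but the last, then the last field verbatim
def pvTail : List (List Char) → List String
  | [] => []
  | [t] => [String.ofList t]
  | p :: q :: ps => (if p ≠ [] then [String.ofList p] else []) ++ pvTail (q :: ps)

-- B on char lists: word tokens of each line joined by '\n' tokens, pvTail on the last line
def pvLines : List (List Char) → List String
  | [] => []
  | [l] => pvTail (pvSplit ' ' l)
  | l :: m :: ls => pvWtoks l ++ "\n" :: pvLines (m :: ls)

def pvB (cs : List Char) : List String := pvLines (pvSplit '\n' cs)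

def pvWtokW (w : List Char) : List String := if w = [] then [] else [String.ofList w]

theorem pvWtokW_eq_ite (w : List Char) :
    (if w ≠ [] then [String.ofList w] else []) = pvWtokW w := by
  by_cases h : w = [] <;> simp [pvWtokW, h]

theorem pvSplit_ne_nil (c : Char) (cs : List Char) : pvSplit c cs ≠ [] := by
  induction cs with
  | nil => simp [pvSplit]
  | cons d cs ih =>
    simp only [pvSplit]
    split
    · simp
    · cases h : pvSplit c cs with
      | nil => exact absurd h ih
      | cons x xs => simp [List.modifyHead]

theorem pvSplit_append (c : Char) (w cs : List Char) (hw : c ∉ w) :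
    pvSplit c (w ++ cs) = (pvSplit c cs).modifyHead (w ++ ·) := by
  induction w with
  | nil =>
    obtain ⟨x, xs, h⟩ := List.exists_cons_of_ne_nil (pvSplit_ne_nil c cs)
    simp [h, List.modifyHead]
  | cons d w ih =>
    have hd : d ≠ c := by
      intro h; exact hw (by simp [h])
    have hw' : c ∉ w := fun h => hw (List.mem_cons_of_mem d h)
    obtain ⟨x, xs, h⟩ := List.exists_cons_of_ne_nil (pvSplit_ne_nil c cs)
    simp only [List.cons_append, pvSplit, if_neg hd, ih hw', h, List.modifyHead]

theorem pvSplit_no_sep (c : Char) (w : List Char) (hw : c ∉ w) : pvSplit c w = [w] := by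
  have := pvSplit_append c w [] hw
  simpa [pvSplit, List.modifyHead] using this

theorem pvSplit_append_sep (c : Char) (w cs : List Char) (hw : c ∉ w) :
    pvSplit c (w ++ c :: cs) = w :: pvSplit c cs := by
  rw [pvSplit_append c w (c :: cs) hw]
  simp [pvSplit, List.modifyHead]

-- bridge: PySem.Chars.splitOn with a single-char separator is pvSplit
theorem pvGo_eq (c : Char) : ∀ (fuel : Nat) (l : List Char), l.length < fuel →
    ∀ (cur : List Char) (acc : List (List Char)),
    PySem.Chars.splitOn.go [c] fuel l cur acc
      = acc.reverse ++ (pvSplit c l).modifyHead (cur.reverse ++ ·) := by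
  intro fuel
  induction fuel with
  | zero => intro l h cur acc; exact absurd h (Nat.not_lt_zero _)
  | succ n ih =>
    intro l hl cur acc
    cases l with
    | nil => simp [PySem.Chars.splitOn.go, pvSplit, List.modifyHead]
    | cons d rest =>
      by_cases hd : d = c
      · subst hd
        have hpre : List.isPrefixOf [d] (d :: rest) = true := by simp [List.isPrefixOf]
        obtain ⟨x, xs, h⟩ := List.exists_cons_of_ne_nil (pvSplit_ne_nil d rest)
        simp only [PySem.Chars.splitOn.go, hpre, if_pos]
        rw [show List.drop (List.length [d]) (d :: rest) = rest by simp]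
        rw [ih rest (by simpa using Nat.lt_of_succ_lt_succ hl) [] (cur.reverse :: acc)]
        simp [pvSplit, h, List.modifyHead]
      · have hpre : List.isPrefixOf [c] (d :: rest) = false := by
          simp [List.isPrefixOf]; exact fun h => absurd h.symm hd
        obtain ⟨x, xs, h⟩ := List.exists_cons_of_ne_nil (pvSplit_ne_nil c rest)
        simp only [PySem.Chars.splitOn.go, hpre]
        rw [if_neg (by simp)]
        rw [ih rest (by simpa using Nat.lt_of_succ_lt_succ hl) (d :: cur) acc]
        simp [pvSplit, hd, h, List.modifyHead]

theorem pvSplitOn_eq (c : Char) (cs : List Char) :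
    PySem.Chars.splitOn cs [c] = pvSplit c cs := by
  obtain ⟨x, xs, h⟩ := List.exists_cons_of_ne_nil (pvSplit_ne_nil c cs)
  rw [PySem.Chars.splitOn, pvGo_eq c (cs.length + 1) cs (by omega) [] []]
  simp [h, List.modifyHead]

-- A's fold equals pvTok
theorem pvFoldA (cs : List Char) : ∀ (wl : List String) (w : List Char),
    (let st := cs.foldl
      (fun (st : List String × List Char) char =>
        if char = ' ' then
          if st.2 ≠ [] then (st.1 ++ [String.ofList st.2], ([] : List Char)) else st
        else if char = '\n' then
          ((if st.2 ≠ [] then st.1 ++ [String.ofList st.2] else st.1) ++ ["\n"], ([] : List Char))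
        else (st.1, st.2 ++ [char]))
      (wl, w)
     st.1 ++ [String.ofList st.2])
    = wl ++ pvTok w cs := by
  induction cs with
  | nil => intro wl w; simp [pvTok]
  | cons c cs ih =>
    intro wl w
    simp only [List.foldl_cons]
    by_cases hsp : c = ' '
    · subst hsp
      by_cases hw : w = []
      · subst hw; simpa [pvTok] using ih wl []
      · simpa [pvTok, hw] using ih (wl ++ [String.ofList w]) []
    · by_cases hnl : c = '\n'
      · subst hnl
        by_cases hw : w = []
        · subst hw; simpa [pvTok] using ih (wl ++ ["\n"]) []
        · simpa [pvTok, hw] using ih (wl ++ [String.ofList w] ++ ["\n"]) []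
      · simpa [pvTok, hsp, hnl] using ih wl (w ++ [c])

theorem pvA_eq_tok (words : String) :
    split_words_on_space_and_newline words = pvTok [] words.toList := by
  unfold split_words_on_space_and_newline
  exact pvFoldA words.toList [] []

-- B-side structural lemmas
def pvNS (w : List Char) : Prop := (' ' : Char) ∉ w ∧ ('\n' : Char) ∉ w

theorem pvNS_nil : pvNS [] := ⟨List.not_mem_nil, List.not_mem_nil⟩

theorem pvWtoks_no_sep (w : List Char) (hw : (' ' : Char) ∉ w) : pvWtoks w = pvWtokW w := by
  rw [pvWtoks, pvSplit_no_sep ' ' w hw]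
  by_cases h : w = []
  · simp [pvWtokW, h]
  · simp [pvWtokW, h]

theorem pvWtoks_space (w cs : List Char) (hw : (' ' : Char) ∉ w) :
    pvWtoks (w ++ ' ' :: cs) = pvWtokW w ++ pvWtoks cs := by
  rw [pvWtoks, pvSplit_append_sep ' ' w cs hw]
  by_cases h : w = []
  · simp [pvWtokW, pvWtoks, h]
  · simp [pvWtokW, pvWtoks, h]

theorem pvLastTok_no_sep (w : List Char) (hw : (' ' : Char) ∉ w) :
    pvTail (pvSplit ' ' w) = [String.ofList w] := by
  rw [pvSplit_no_sep ' ' w hw, pvTail]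

theorem pvLastTok_space (w cs : List Char) (hw : (' ' : Char) ∉ w) :
    pvTail (pvSplit ' ' (w ++ ' ' :: cs)) = pvWtokW w ++ pvTail (pvSplit ' ' cs) := by
  rw [pvSplit_append_sep ' ' w cs hw]
  obtain ⟨x, xs, h⟩ := List.exists_cons_of_ne_nil (pvSplit_ne_nil ' ' cs)
  rw [h, pvTail, pvWtokW_eq_ite]

theorem pvB_no_sep (w : List Char) (hw : pvNS w) : pvB w = [String.ofList w] := by
  rw [pvB, pvSplit_no_sep '\n' w hw.2, pvLines, pvLastTok_no_sep w hw.1]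

theorem pvB_space (w cs : List Char) (hw : pvNS w) :
    pvB (w ++ ' ' :: cs) = pvWtokW w ++ pvB cs := by
  have hnw : ('\n' : Char) ∉ w ++ [' '] := by
    intro hmem
    rcases List.mem_append.mp hmem with hmem | hmem
    · exact hw.2 hmem
    · simp at hmem
  rw [pvB, show w ++ ' ' :: cs = (w ++ [' ']) ++ cs by simp, pvSplit_append '\n' _ cs hnw]
  obtain ⟨x, xs, h⟩ := List.exists_cons_of_ne_nil (pvSplit_ne_nil '\n' cs)
  rw [h]
  simp only [List.modifyHead]
  rw [show (w ++ [' ']) ++ x = w ++ ' ' :: x by simp]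
  cases xs with
  | nil => rw [pvLines, pvLastTok_space w x hw.1, pvB, h, pvLines]
  | cons y ys =>
    rw [pvLines, pvWtoks_space w x hw.1, pvB, h, pvLines]
    simp

theorem pvB_newline (w cs : List Char) (hw : pvNS w) :
    pvB (w ++ '\n' :: cs) = pvWtokW w ++ "\n" :: pvB cs := by
  rw [pvB, pvSplit_append_sep '\n' w cs hw.2]
  obtain ⟨x, xs, h⟩ := List.exists_cons_of_ne_nil (pvSplit_ne_nil '\n' cs)
  rw [h, pvLines, pvWtoks_no_sep w hw.1, pvB, h]

-- the heart: A's state machine equals B's split-based tokenization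
theorem pvMain (cs : List Char) : ∀ (w : List Char), pvNS w →
    pvTok w cs = pvB (w ++ cs) := by
  induction cs with
  | nil =>
    intro w hw
    rw [List.append_nil, pvB_no_sep w hw, pvTok]
  | cons c cs ih =>
    intro w hw
    by_cases hsp : c = ' '
    · subst hsp
      rw [pvB_space w cs hw]
      simp only [pvTok]
      rw [ih [] pvNS_nil]
      simp [pvWtokW]
    · by_cases hnl : c = '\n'
      · subst hnl
        rw [pvB_newline w cs hw]
        simp only [pvTok]
        rw [ih [] pvNS_nil]
        simp [pvWtokW]
      · have hw' : pvNS (w ++ [c]) := by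
          constructor
          · intro hmem
            rcases List.mem_append.mp hmem with hmem | hmem
            · exact hw.1 hmem
            · simp at hmem; exact hsp hmem.symm
          · intro hmem
            rcases List.mem_append.mp hmem with hmem | hmem
            · exact hw.2 hmem
            · simp at hmem; exact hnl hmem.symm
        rw [pvTok, if_neg hsp, if_neg hnl, ih (w ++ [c]) hw']
        simp

-- B's port equals pvB
theorem pvSplitQ_eq (line : String) (c : Char) (s : String) (hs : s.toList = [c]) :
    (PySem.Str.split? line s).getD [] = (pvSplit c line.toList).map String.ofList := by
  rw [PySem.Str.split?, PySem.Chars.split?, if_neg (by simp [hs]), hs, pvSplitOn_eq]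
  simp

theorem pvFilterMap (ws : List (List Char)) :
    (ws.map String.ofList).filter (· ≠ "") = (ws.filter (· ≠ [])).map String.ofList := by
  rw [List.filter_map]
  congr 1
  apply List.filter_congr
  intro w _
  simp [Function.comp]

theorem pvInnerFold (ws : List String) (acc : List String) :
    ws.foldl (fun acc w => if w ≠ "" then acc ++ [w] else acc) acc
      = acc ++ ws.filter (· ≠ "") := by
  induction ws generalizing acc with
  | nil => simp
  | cons w ws ih =>
    simp only [List.foldl_cons, List.filter_cons]
    by_cases h : w = ""
    · subst h; rw [if_neg (by simp), ih]; simp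
    · rw [if_pos h, ih]; simp [h]

theorem pvLineTok (line : String) :
    ((PySem.Str.split? line " ").getD []).filter (· ≠ "") = pvWtoks line.toList := by
  rw [pvSplitQ_eq line ' ' " " rfl, pvFilterMap, pvWtoks]

theorem pvOuterFold (ls : List (List Char)) : ∀ (acc : List String),
    (ls.map String.ofList).foldl
      (fun word_list line =>
        (((PySem.Str.split? line " ").getD []).foldl
          (fun acc w => if w ≠ "" then acc ++ [w] else acc) word_list) ++ ["\n"])
      acc
    = acc ++ ls.flatMap (fun l => pvWtoks l ++ ["\n"]) := by
  induction ls with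
  | nil => intro acc; simp
  | cons l ls ih =>
    intro acc
    rw [List.map_cons, List.foldl_cons, ih, pvInnerFold, pvLineTok]
    simp

theorem pvTail_concat (qs : List (List Char)) (t : List Char) :
    pvTail (qs ++ [t]) = (qs.filter (· ≠ [])).map String.ofList ++ [String.ofList t] := by
  induction qs with
  | nil => simp [pvTail]
  | cons q qs ih =>
    have hcons : ∃ m rest, qs ++ [t] = m :: rest := by
      cases qs with
      | nil => exact ⟨t, [], rfl⟩
      | cons a l => exact ⟨a, l ++ [t], rfl⟩
    obtain ⟨m, rest, hm⟩ := hcons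
    rw [List.cons_append, hm, pvTail, ← hm, ih, List.filter_cons]
    by_cases h : q = []
    · subst h; simp
    · simp [h]

theorem pvLines_concat (ls : List (List Char)) (t : List Char) :
    pvLines (ls ++ [t])
      = ls.flatMap (fun l => pvWtoks l ++ ["\n"]) ++ pvTail (pvSplit ' ' t) := by
  induction ls with
  | nil => simp [pvLines]
  | cons l ls ih =>
    have hcons : ∃ m rest, ls ++ [t] = m :: rest := by
      cases ls with
      | nil => exact ⟨t, [], rfl⟩
      | cons a l' => exact ⟨a, l' ++ [t], rfl⟩
    obtain ⟨m, rest, hm⟩ := hcons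
    rw [List.cons_append, hm, pvLines, ← hm, ih]
    simp

theorem pvB_eq_alt (words : String) :
    split_words_on_space_and_newline_alt words = pvB words.toList := by
  unfold split_words_on_space_and_newline_alt
  dsimp only
  rw [pvSplitQ_eq words '\n' "\n" rfl]
  obtain ⟨qs, t, hqt⟩ :
      ∃ qs t, pvSplit '\n' words.toList = qs ++ [t] := by
    rcases List.eq_nil_or_concat (pvSplit '\n' words.toList) with h | ⟨qs, t, h⟩
    · exact absurd h (pvSplit_ne_nil '\n' words.toList)
    · exact ⟨qs, t, by simpa using h⟩
  rw [hqt, List.map_append, List.map_singleton, List.dropLast_concat, List.getLastD_concat]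
  rw [pvOuterFold qs []]
  rw [pvSplitQ_eq (String.ofList t) ' ' " " rfl, String.toList_ofList]
  obtain ⟨ps, pt, hpt⟩ :
      ∃ ps pt, pvSplit ' ' t = ps ++ [pt] := by
    rcases List.eq_nil_or_concat (pvSplit ' ' t) with h | ⟨ps, pt, h⟩
    · exact absurd h (pvSplit_ne_nil ' ' t)
    · exact ⟨ps, pt, by simpa using h⟩
  rw [hpt, List.map_append, List.map_singleton, List.dropLast_concat, List.getLastD_concat]
  rw [pvInnerFold, pvFilterMap]
  rw [pvB, hqt, pvLines_concat, hpt, pvTail_concat]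
  simp

-- ===== VERDICT (by name: the statement is the Claim_ definition above) =====
theorem split_words_on_space_and_newline_spec : Claim_equal_split_words_on_space_and_newline := by
  intro words _
  unfold Spec_split_words_on_space_and_newline
  rw [pvA_eq_tok, pvB_eq_alt]
  exact pvMain words.toList [] pvNS_nil
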